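-- pv_equiv track=rewrite | github.com/ssbagalkar/PythonDataStructuresPractice | Recursion_aditya-verma-playlist/03_delete_middle_element_from_stack.py | del_middle_element
-- ===== SOURCE A (Python) =====
-- def del_middle_element(arr, middle_el_index):
-- 	# base condition
-- 	if middle_el_index == 0:
-- 		arr.pop()
-- 		return arr
--
-- 	# store temporary values to add later
-- 	tmp = arr.pop()
-- 	del_middle_element(arr, middle_el_index-1)
-- 	arr.append(tmp)
-- 	return arr
-- ===== SOURCE B (Python) =====
-- def del_middle_element(arr, middle_el_index):
--     # Iterative: explicit temp stack instead of recursion on the call stack.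
--     tmp = []
--     while middle_el_index != 0:
--         tmp.append(arr.pop())
--         middle_el_index -= 1
--     arr.pop()
--     for x in reversed(tmp):
--         arr.append(x)
--     return arr
-- ===== Notes on version B (the rewrite author's own statement) =====
-- stated objective: alternative
-- what changed: Replaces the recursion (which uses the call stack to hold popped elements) by an iterative loop that pops into an explicit temporary list and re-appends it in reverse, avoiding deep recursion.
import Mathlib
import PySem

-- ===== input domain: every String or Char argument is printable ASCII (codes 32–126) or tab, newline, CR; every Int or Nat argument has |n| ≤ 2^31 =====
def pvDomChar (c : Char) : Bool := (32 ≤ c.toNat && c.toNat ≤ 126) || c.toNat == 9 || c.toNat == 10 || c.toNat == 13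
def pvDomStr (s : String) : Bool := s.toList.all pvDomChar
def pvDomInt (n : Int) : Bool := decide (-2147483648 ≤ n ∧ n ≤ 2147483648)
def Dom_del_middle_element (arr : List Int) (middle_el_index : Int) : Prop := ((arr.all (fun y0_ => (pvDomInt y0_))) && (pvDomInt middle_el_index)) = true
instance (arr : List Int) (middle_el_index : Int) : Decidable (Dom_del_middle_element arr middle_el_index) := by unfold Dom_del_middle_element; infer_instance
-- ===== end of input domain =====

-- B replaces the recursion by an iterative loop with an explicit temporary stack; the proved
-- equivalence is about the RETURN value (both Pythons also mutate arr in place identically).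

-- ===== PORT A =====
-- recursive: pop, recurse with middle_el_index-1, re-append the popped value
def del_middle_element (arr : List Int) (middle_el_index : Int) : List Int :=
  if middle_el_index = 0 then
    match PySem.List.pop? arr (-1) with
    | none => []                         -- Python raises IndexError here (outside Pre_)
    | some (_, rest) => rest
  else
    match h : PySem.List.pop? arr (-1) with
    | none => []                         -- Python raises IndexError here (outside Pre_)
    | some (tmp, rest) => del_middle_element rest (middle_el_index - 1) ++ [tmp]
termination_by arr.length
decreasing_by
  have := PySem.List.length_of_pop?_eq_some arr h
  simp at this
  omega

-- ===== PORT B =====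
-- while middle_el_index != 0: tmp.append(arr.pop()); middle_el_index -= 1
def popLoop (arr tmp : List Int) (m : Int) : List Int × List Int :=
  if m = 0 then (arr, tmp)
  else
    match h : PySem.List.pop? arr (-1) with
    | none => (arr, tmp)                 -- Python raises IndexError here (outside Pre_)
    | some (x, rest) => popLoop rest (tmp ++ [x]) (m - 1)
termination_by arr.length
decreasing_by
  have := PySem.List.length_of_pop?_eq_some arr h
  simp at this
  omega

def del_middle_element_alt (arr : List Int) (middle_el_index : Int) : List Int :=
  let p := popLoop arr [] middle_el_index
  let arr1 :=
    match PySem.List.pop? p.1 (-1) with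
    | none => []                         -- Python raises IndexError here (outside Pre_)
    | some (_, rest) => rest
  arr1 ++ p.2.reverse                    -- for x in reversed(tmp): arr.append(x)

-- ===== PRECONDITION & SPEC =====
-- A (and B) raise IndexError when middle_el_index is negative or ≥ len(arr): Pre_ is the valid depth range.
def Pre_del_middle_element (arr : List Int) (middle_el_index : Int) : Prop :=
  0 ≤ middle_el_index ∧ middle_el_index < arr.length

instance (arr : List Int) (middle_el_index : Int) : Decidable (Pre_del_middle_element arr middle_el_index) := by
  unfold Pre_del_middle_element; infer_instance

def pvWitness_del_middle_element : List Int × Int := ([3, 1, 4, 1, 5], 2)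

def Spec_del_middle_element (arr : List Int) (middle_el_index : Int) (out : List Int) : Prop := out = del_middle_element_alt arr middle_el_index
instance (arr : List Int) (middle_el_index : Int) (out : List Int) : Decidable (Spec_del_middle_element arr middle_el_index out) := by unfold Spec_del_middle_element; infer_instance

-- ===== CLAIM (what is proved, stated in full; the proofs are below) =====
def Claim_equal_del_middle_element : Prop := ∀ (arr : List Int) (middle_el_index : Int), Dom_del_middle_element arr middle_el_index → Pre_del_middle_element arr middle_el_index → Spec_del_middle_element arr middle_el_index (del_middle_element arr middle_el_index)

-- ===== LEMMAS AND PROOFS =====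

theorem exists_concat_of_ne_nil {l : List Int} (h : l ≠ []) : ∃ ys x, l = ys ++ [x] := by
  rcases List.eq_nil_or_concat l with h' | ⟨ys, x, h'⟩
  · exact absurd h' h
  · exact ⟨ys, x, by simpa [List.concat_eq_append] using h'⟩

-- A computes take (k-1) ++ drop k where k = length - m.toNat
theorem del_A_closed (n : ℕ) : ∀ (arr : List Int) (m : Int), m.toNat = n →
    0 ≤ m → m < arr.length →
    del_middle_element arr m =
      arr.take (arr.length - m.toNat - 1) ++ arr.drop (arr.length - m.toNat) := by
  induction n with
  | zero =>
    intro arr m hn h0 hlt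
    have hm : m = 0 := by omega
    subst hm
    have hne : arr ≠ [] := by
      intro hc; subst hc; simp at hlt
    obtain ⟨ys, x, rfl⟩ := exists_concat_of_ne_nil hne
    rw [del_middle_element.eq_def]
    simp [PySem.List.pop?_last,
      List.take_append_of_le_length (by simp : ys.length ≤ ys.length)]
  | succ n ih =>
    intro arr m hn h0 hlt
    have hne : arr ≠ [] := by
      intro hc; subst hc; simp at hlt; omega
    obtain ⟨ys, x, rfl⟩ := exists_concat_of_ne_nil hne
    rw [del_middle_element.eq_def]
    rw [if_neg (by omega)]
    split
    case _ heq => rw [PySem.List.pop?_last] at heq; exact absurd heq (by simp)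
    case _ tmp rest heq =>
    rw [PySem.List.pop?_last] at heq
    obtain ⟨rfl, rfl⟩ : x = tmp ∧ ys = rest := by
      simpa [eq_comm] using heq
    have hlen : (ys ++ [x]).length = ys.length + 1 := by simp
    have hihm : (m - 1).toNat = n := by omega
    have hlt' : m - 1 < (ys.length : Int) := by omega
    rw [ih ys (m - 1) hihm (by omega) hlt']
    have hk1 : (ys ++ [x]).length - m.toNat - 1 = ys.length - n - 1 := by simp; omega
    have hk2 : (ys ++ [x]).length - m.toNat = ys.length - n := by simp; omega
    rw [hk1, hk2,
      List.take_append_of_le_length (by omega : ys.length - n - 1 ≤ ys.length),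
      List.drop_append_of_le_length (by omega : ys.length - n ≤ ys.length)]
    simp [show m.toNat - 1 = n from by omega]

theorem popLoop_closed (n : ℕ) : ∀ (arr tmp : List Int) (m : Int), m.toNat = n →
    0 ≤ m → m ≤ arr.length →
    popLoop arr tmp m =
      (arr.take (arr.length - m.toNat), tmp ++ (arr.drop (arr.length - m.toNat)).reverse) := by
  induction n with
  | zero =>
    intro arr tmp m hn h0 hle
    have hm : m = 0 := by omega
    subst hm
    rw [popLoop.eq_def]
    simp
  | succ n ih =>
    intro arr tmp m hn h0 hle
    have hne : arr ≠ [] := by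
      intro hc; subst hc; simp at hle; omega
    obtain ⟨ys, x, rfl⟩ := exists_concat_of_ne_nil hne
    rw [popLoop.eq_def]
    rw [if_neg (by omega)]
    split
    case _ heq => rw [PySem.List.pop?_last] at heq; exact absurd heq (by simp)
    case _ x' rest heq =>
    rw [PySem.List.pop?_last] at heq
    obtain ⟨rfl, rfl⟩ : x = x' ∧ ys = rest := by
      simpa [eq_comm] using heq
    have hlen : (ys ++ [x]).length = ys.length + 1 := by simp
    have hihm : (m - 1).toNat = n := by omega
    have hle' : m - 1 ≤ (ys.length : Int) := by omega
    rw [ih ys (tmp ++ [x]) (m - 1) hihm (by omega) hle']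
    have hk : (ys ++ [x]).length - m.toNat = ys.length - n := by simp; omega
    rw [hk,
      List.take_append_of_le_length (by omega : ys.length - n ≤ ys.length),
      List.drop_append_of_le_length (by omega : ys.length - n ≤ ys.length)]
    simp [show m.toNat - 1 = n from by omega]

-- ===== VERDICT (by name: the statement is the Claim_ definition above) =====
theorem del_middle_element_spec : Claim_equal_del_middle_element := by
  intro arr m _ hpre
  obtain ⟨h0, hlt⟩ := hpre
  unfold Spec_del_middle_element del_middle_element_alt
  rw [popLoop_closed m.toNat arr [] m rfl h0 (by omega)]
  rw [del_A_closed m.toNat arr m rfl h0 hlt]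
  have hk : 1 ≤ arr.length - m.toNat := by omega
  have hne : arr.take (arr.length - m.toNat) ≠ [] := by
    intro hc
    have := congrArg List.length hc
    simp [List.length_take] at this
    omega
  obtain ⟨ys, x, hx⟩ := exists_concat_of_ne_nil hne
  rw [hx]
  simp only [PySem.List.pop?_last, List.nil_append, List.reverse_reverse]
  congr 1
  have hlys : ys.length = arr.length - m.toNat - 1 := by
    have := congrArg List.length hx
    simp [List.length_take] at this
    omega
  calc arr.take (arr.length - m.toNat - 1)
      = (arr.take (arr.length - m.toNat)).take (arr.length - m.toNat - 1) := by
        rw [List.take_take]; congr 1; omega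
    _ = (ys ++ [x]).take (arr.length - m.toNat - 1) := by rw [hx]
    _ = ys := by
        rw [List.take_append_of_le_length (by omega), ← hlys, List.take_length]
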